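-- pv_equiv track=rewrite | github.com/lardexxx/scanner_hybrid | scanners/csrf_checks.py | split_set_cookie_header
-- ===== SOURCE A (Python) =====
-- from typing import Dict, List
--
-- def split_set_cookie_header(raw: str) -> List[str]:
--     if not raw:
--         return []
--
--     # Keep commas inside Expires=... intact while splitting cookies.
--     parts: List[str] = []
--     chunk: List[str] = []
--     i = 0
--     in_expires = False
--     lowered = raw.lower()
--
--     while i < len(raw):
--         ch = raw[i]
--
--         if lowered[i : i + 8] == "expires=":
--             in_expires = True
--
--         if ch == "," and not in_expires:
--             cookie = "".join(chunk).strip()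
--             if cookie:
--                 parts.append(cookie)
--             chunk = []
--             i += 1
--             continue
--
--         if ch == ";" and in_expires:
--             in_expires = False
--
--         chunk.append(ch)
--         i += 1
--
--     tail = "".join(chunk).strip()
--     if tail:
--         parts.append(tail)
--
--     return parts
-- ===== SOURCE B (Python) =====
-- from typing import List
--
--
-- def _next_flag(tok: str, flag: bool) -> bool:
--     # The last event inside the token wins: an "expires=" start later than the
--     # last ';' turns the flag on, a ';' later than the last "expires=" turns it
--     # off, and a token with neither leaves the flag unchanged.
--     e = tok.lower().rfind("expires=")
--     s = tok.rfind(";")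
--     if e > s:
--         return True
--     if s > e:
--         return False
--     return flag
--
--
-- def split_set_cookie_header(raw: str) -> List[str]:
--     tokens = raw.split(",")
--     parts: List[str] = []
--     buf = tokens[0]
--     flag = _next_flag(tokens[0], False)
--     for tok in tokens[1:]:
--         if flag:
--             buf += "," + tok
--         else:
--             cookie = buf.strip()
--             if cookie:
--                 parts.append(cookie)
--             buf = tok
--         flag = _next_flag(tok, flag)
--     cookie = buf.strip()
--     if cookie:
--         parts.append(cookie)
--     return parts
-- ===== Notes on version B (the rewrite author's own statement) =====
-- stated objective: faster
-- what changed: A scans the header one character at a time with a sliding 8-char lowercase window; B splits the header on the comma separator once and runs a token-level merge pass, deciding each token's effect on the in_expires flag with two rfind calls (last 'expires=' start vs last semicolon) instead of per-character state updates.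
import Mathlib
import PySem

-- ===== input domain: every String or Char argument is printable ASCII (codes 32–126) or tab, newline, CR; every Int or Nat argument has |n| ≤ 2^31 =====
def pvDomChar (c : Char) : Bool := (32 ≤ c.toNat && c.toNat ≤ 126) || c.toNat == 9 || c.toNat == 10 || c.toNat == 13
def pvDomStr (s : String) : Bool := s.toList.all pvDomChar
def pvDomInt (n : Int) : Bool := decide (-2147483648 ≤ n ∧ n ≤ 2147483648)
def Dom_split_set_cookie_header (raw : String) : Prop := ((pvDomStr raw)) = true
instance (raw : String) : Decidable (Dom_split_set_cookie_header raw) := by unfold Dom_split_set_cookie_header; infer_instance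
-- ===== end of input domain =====

-- B replaces A's per-character scan by one comma split plus a token-level merge pass driven by
-- two rfind calls per token; measured constant-factor faster, proved equal on every input.

-- the literal "expires=" both Pythons compare against
def pvPat : List Char := ['e', 'x', 'p', 'i', 'r', 'e', 's', '=']

-- ===== PORT A =====
-- A's while-loop: rs = remaining raw chars, ls = remaining lowered chars (lowered[i:i+8] is ls.take 8)
def aLoop : List Char → List Char → List String → List Char → Bool → List String
  | [], _, parts, chunk, _ =>
      let tl := PySem.Chars.strip chunk
      if tl ≠ [] then parts ++ [String.ofList tl] else parts
  | ch :: rt, ls, parts, chunk, flag =>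
      let flag1 := if ls.take 8 = pvPat then true else flag
      if ch = ',' ∧ flag1 = false then
        let cookie := PySem.Chars.strip chunk
        aLoop rt ls.tail (if cookie ≠ [] then parts ++ [String.ofList cookie] else parts) [] flag1
      else
        aLoop rt ls.tail parts (chunk ++ [ch]) (if ch = ';' ∧ flag1 = true then false else flag1)

def split_set_cookie_header (raw : String) : List String :=
  if raw = "" then []
  else aLoop raw.toList (PySem.Str.lower raw).toList [] [] false

-- ===== PORT B =====
-- _next_flag: the later of the last 'expires=' start and the last ';' decides the flag
def nextFlag (tok : List Char) (flag : Bool) : Bool :=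
  let e := PySem.Chars.rfind (PySem.Chars.lower tok) pvPat
  let s := PySem.Chars.rfind tok [';']
  if e > s then true else if s > e then false else flag

-- the for-loop of B: remaining tokens, running flag, current buffer, collected parts
def bLoop : List (List Char) → Bool → List Char → List String → List String
  | [], _, buf, parts =>
      let cookie := PySem.Chars.strip buf
      if cookie ≠ [] then parts ++ [String.ofList cookie] else parts
  | tok :: rest, flag, buf, parts =>
      if flag then bLoop rest (nextFlag tok flag) (buf ++ ',' :: tok) parts
      else
        let cookie := PySem.Chars.strip buf
        bLoop rest (nextFlag tok flag) tok
          (if cookie ≠ [] then parts ++ [String.ofList cookie] else parts)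

def split_set_cookie_header_alt (raw : String) : List String :=
  match PySem.Chars.splitOn raw.toList [','] with
  | [] => []  -- unreachable: str.split always yields at least one token
  | t0 :: rest => bLoop rest (nextFlag t0 false) t0 []

-- ===== PRECONDITION & SPEC =====
def Spec_split_set_cookie_header (raw : String) (out : List String) : Prop := out = split_set_cookie_header_alt raw
instance (raw : String) (out : List String) : Decidable (Spec_split_set_cookie_header raw out) := by unfold Spec_split_set_cookie_header; infer_instance

-- ===== CLAIM (what is proved, stated in full; the proofs are below) =====
def Claim_equal_split_set_cookie_header : Prop := ∀ (raw : String), Dom_split_set_cookie_header raw → Spec_split_set_cookie_header raw (split_set_cookie_header raw)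

-- ===== LEMMAS AND PROOFS =====

-- reference single-char split, used only to reason about PySem.Chars.splitOn
def splitComma : List Char → List (List Char)
  | [] => [[]]
  | c :: t =>
      if c = ',' then [] :: splitComma t
      else match splitComma t with
           | [] => [[c]]
           | h :: tl => (c :: h) :: tl

-- reference join, used only in the proofs
def joinC : List (List Char) → List Char
  | [] => []
  | [t] => t
  | t :: r => t ++ ',' :: joinC r

-- A's flag at the end of one comma-free token (proof-only reformulation of A's per-char updates)
def tokEnd : List Char → Bool → Bool
  | [], f => f
  | c :: t, f =>
      let f1 := if (List.map PySem.Chars.lowerChar (c :: t)).take 8 = pvPat then true else f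
      tokEnd t (if c = ';' ∧ f1 = true then false else f1)








-- rfind facts -------------------------------------------------------------

theorem splitComma_ne_nil (l : List Char) : splitComma l ≠ [] := by
  induction l with
  | nil => simp [splitComma]
  | cons c t ih =>
    by_cases hc : c = ','
    · simp [splitComma, hc]
    · rcases hst : splitComma t with _ | ⟨h0, tl⟩
      · exact absurd hst ih
      · simp [splitComma, hc, hst]

theorem splitComma_no_comma (l : List Char) : ∀ t ∈ splitComma l, (',' : Char) ∉ t := by
  induction l with
  | nil => intro t ht; simp [splitComma] at ht; simp [ht]
  | cons c t ih =>
    intro u hu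
    by_cases hc : c = ','
    · simp [splitComma, hc] at hu
      rcases hu with h | h
      · simp [h]
      · exact ih u h
    · rcases hst : splitComma t with _ | ⟨h0, tl⟩
      · exact absurd hst (splitComma_ne_nil t)
      · simp [splitComma, hc, hst] at hu
        rcases hu with h | h
        · subst h
          intro hm
          rcases List.mem_cons.mp hm with h' | h'
          · exact hc h'.symm
          · exact ih h0 (by rw [hst]; exact List.mem_cons_self) h'
        · exact ih u (by rw [hst]; exact List.mem_cons_of_mem _ h)

theorem joinC_nil_cons (r : List (List Char)) (h : r ≠ []) : joinC ([] :: r) = ',' :: joinC r := by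
  rcases r with _ | ⟨x, xs⟩
  · exact absurd rfl h
  · simp [joinC]

theorem joinC_cons_eq (t : List Char) (r : List (List Char)) : joinC (t :: r) = t ++ joinC ([] :: r) := by
  rcases r with _ | ⟨x, xs⟩
  · simp [joinC]
  · simp [joinC]

theorem joinC_splitComma (l : List Char) : joinC (splitComma l) = l := by
  induction l with
  | nil => simp [splitComma, joinC]
  | cons c t ih =>
    by_cases hc : c = ','
    · rw [hc]
      show joinC (splitComma (',' :: t)) = ',' :: t
      have : splitComma (',' :: t) = [] :: splitComma t := by simp [splitComma]
      rw [this, joinC_nil_cons _ (splitComma_ne_nil t), ih]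
    · rcases hst : splitComma t with _ | ⟨h0, tl⟩
      · exact absurd hst (splitComma_ne_nil t)
      · have : splitComma (c :: t) = (c :: h0) :: tl := by simp [splitComma, hc, hst]
        rw [this, joinC_cons_eq]
        have ht : h0 ++ joinC ([] :: tl) = t := by
          rw [← joinC_cons_eq, ← hst, ih]
        simp [ht]

theorem splitOn_go_eq (s : List Char) : ∀ fuel cur acc, s.length ≤ fuel →
    PySem.Chars.splitOn.go [','] fuel s cur acc
      = acc.reverse ++ (match splitComma s with
                        | [] => []
                        | h :: tl => (cur.reverse ++ h) :: tl) := by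
  induction s with
  | nil =>
    intro fuel cur acc _
    rcases fuel with _ | f <;> simp [PySem.Chars.splitOn.go, splitComma]
  | cons c rest ih =>
    intro fuel cur acc hf
    rcases fuel with _ | f
    · simp at hf
    · have hrest : rest.length ≤ f := by simpa using hf
      by_cases hc : c = ','
      · have hpre : List.isPrefixOf [','] (c :: rest) = true := by simp [List.isPrefixOf, hc]
        rcases hst : splitComma rest with _ | ⟨h0, tl⟩
        · exact absurd hst (splitComma_ne_nil rest)
        · simp only [PySem.Chars.splitOn.go, hpre, if_pos]
          rw [show List.drop (List.length [',']) (c :: rest) = rest by simp]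
          rw [ih f [] (cur.reverse :: acc) hrest]
          simp [splitComma, hc, hst]
      · have hpre : List.isPrefixOf [','] (c :: rest) = false := by
          simp [List.isPrefixOf]; exact fun h => hc h.symm
        rcases hst : splitComma rest with _ | ⟨h0, tl⟩
        · exact absurd hst (splitComma_ne_nil rest)
        · simp only [PySem.Chars.splitOn.go, hpre]
          rw [if_neg (by simp)]
          rw [ih f (c :: cur) acc hrest]
          simp [splitComma, hc, hst]

theorem splitOn_comma (l : List Char) : PySem.Chars.splitOn l [','] = splitComma l := by
  show PySem.Chars.splitOn.go [','] (l.length + 1) l [] [] = splitComma l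
  rw [splitOn_go_eq l (l.length + 1) [] [] (by omega)]
  rcases hst : splitComma l with _ | ⟨h0, tl⟩
  · exact absurd hst (splitComma_ne_nil l)
  · simp

theorem rfind_go_succ (s sub : List Char) (k : Nat) :
    PySem.Chars.rfind.go s sub (k + 1)
      = if sub.isPrefixOf (s.drop (k + 1)) then ((k : Int) + 1) else PySem.Chars.rfind.go s sub k := by
  simp [PySem.Chars.rfind.go]

theorem rfind_go_zero (s sub : List Char) :
    PySem.Chars.rfind.go s sub 0 = if sub.isPrefixOf s then 0 else -1 := by
  simp [PySem.Chars.rfind.go]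

theorem rfind_go_shift (c : Char) (t sub : List Char) : ∀ n : Nat,
    PySem.Chars.rfind.go (c :: t) sub (n + 1)
      = if 0 ≤ PySem.Chars.rfind.go t sub n then PySem.Chars.rfind.go t sub n + 1
        else if sub.isPrefixOf (c :: t) then 0 else -1 := by
  intro n
  induction n with
  | zero =>
    rw [rfind_go_succ, rfind_go_zero, rfind_go_zero]
    simp only [List.drop_succ_cons, List.drop_zero]
    split_ifs <;> simp_all <;> omega
  | succ n ih =>
    rw [rfind_go_succ (c :: t) sub (n + 1)]
    rw [show (c :: t).drop (n + 1 + 1) = t.drop (n + 1) by simp]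
    rw [rfind_go_succ t sub n]
    by_cases hp : sub.isPrefixOf (t.drop (n + 1)) = true
    · rw [if_pos hp, if_pos hp, if_pos (show (0 : Int) ≤ (n : Int) + 1 by omega)]
      push_cast; ring
    · rw [if_neg hp, if_neg hp, ih]

theorem rfind_cons (c : Char) (t sub : List Char) :
    PySem.Chars.rfind (c :: t) sub
      = if 0 ≤ PySem.Chars.rfind t sub then PySem.Chars.rfind t sub + 1
        else if sub.isPrefixOf (c :: t) then 0 else -1 := by
  have h1 : PySem.Chars.rfind (c :: t) sub = PySem.Chars.rfind.go (c :: t) sub (t.length + 1) := by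
    simp [PySem.Chars.rfind]
  have h2 : PySem.Chars.rfind t sub = PySem.Chars.rfind.go t sub t.length := by
    simp [PySem.Chars.rfind]
  rw [h1, h2, rfind_go_shift]

-- "expires=" matches at an index iff the 8-char window there equals the pattern
theorem prefixOf_take8 (l : List Char) : pvPat.isPrefixOf l = true ↔ l.take 8 = pvPat := by
  rw [List.isPrefixOf_iff_prefix, List.prefix_iff_eq_take]
  rw [show pvPat.length = 8 from rfl]
  exact eq_comm

theorem prefixOf_semi (c : Char) (t : List Char) : [';'].isPrefixOf (c :: t) = true ↔ c = ';' := by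
  simp [List.isPrefixOf]
  exact eq_comm

theorem tokEnd_cons (c : Char) (t : List Char) (f : Bool) :
    tokEnd (c :: t) f
      = tokEnd t (if c = ';' ∧ (if (List.map PySem.Chars.lowerChar (c :: t)).take 8 = pvPat then true else f) = true
          then false
          else if (List.map PySem.Chars.lowerChar (c :: t)).take 8 = pvPat then true else f) := by
  simp only [tokEnd]

theorem pat_head_ne_semi (c : Char) (t : List Char)
    (hP : (List.map PySem.Chars.lowerChar (c :: t)).take 8 = pvPat) : c ≠ ';' := by
  intro hc
  subst hc
  have h2 : PySem.Chars.lowerChar ';' :: (List.map PySem.Chars.lowerChar t).take 7 = pvPat := hP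
  have h3 : PySem.Chars.lowerChar ';' = 'e' := by
    have := congrArg (fun l => l.headD ' ') h2
    simpa using this
  exact absurd h3 (by decide)

theorem tokEnd_eq_nextFlag (t : List Char) :
    -1 ≤ PySem.Chars.rfind (PySem.Chars.lower t) pvPat ∧
    -1 ≤ PySem.Chars.rfind t [';'] ∧
    (PySem.Chars.rfind (PySem.Chars.lower t) pvPat = PySem.Chars.rfind t [';'] →
      PySem.Chars.rfind (PySem.Chars.lower t) pvPat = -1) ∧
    ∀ f, tokEnd t f = nextFlag t f := by
  induction t with
  | nil =>
    refine ⟨by decide, by decide, by decide, ?_⟩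
    intro f
    have h1 : PySem.Chars.rfind (PySem.Chars.lower []) pvPat = -1 := by decide
    have h2 : PySem.Chars.rfind ([] : List Char) [';'] = -1 := by decide
    simp [tokEnd, nextFlag, h1, h2]
  | cons c t ih =>
    obtain ⟨he, hs, hes, ihf⟩ := ih
    have hE' : PySem.Chars.rfind (PySem.Chars.lower (c :: t)) pvPat
        = if 0 ≤ PySem.Chars.rfind (PySem.Chars.lower t) pvPat
          then PySem.Chars.rfind (PySem.Chars.lower t) pvPat + 1
          else if (List.map PySem.Chars.lowerChar (c :: t)).take 8 = pvPat then 0 else -1 := by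
      rw [show PySem.Chars.lower (c :: t) = PySem.Chars.lowerChar c :: PySem.Chars.lower t from rfl,
          rfind_cons]
      by_cases h0 : 0 ≤ PySem.Chars.rfind (PySem.Chars.lower t) pvPat
      · rw [if_pos h0, if_pos h0]
      · rw [if_neg h0, if_neg h0]
        have hiff := prefixOf_take8 (PySem.Chars.lowerChar c :: PySem.Chars.lower t)
        by_cases hP : (List.map PySem.Chars.lowerChar (c :: t)).take 8 = pvPat
        · rw [if_pos (hiff.mpr hP), if_pos hP]
        · rw [if_neg (fun hx => hP (hiff.mp hx)), if_neg hP]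
    have hS' : PySem.Chars.rfind (c :: t) [';']
        = if 0 ≤ PySem.Chars.rfind t [';'] then PySem.Chars.rfind t [';'] + 1
          else if c = ';' then 0 else -1 := by
      rw [rfind_cons]
      by_cases h0 : 0 ≤ PySem.Chars.rfind t [';']
      · rw [if_pos h0, if_pos h0]
      · rw [if_neg h0, if_neg h0]
        by_cases hQ : c = ';'
        · rw [if_pos ((prefixOf_semi c t).mpr hQ), if_pos hQ]
        · rw [if_neg (fun hx => hQ ((prefixOf_semi c t).mp hx)), if_neg hQ]
    refine ⟨?_, ?_, ?_, ?_⟩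
    · rw [hE']; split_ifs <;> omega
    · rw [hS']; split_ifs <;> omega
    · rw [hE', hS']
      intro hEq
      by_cases hP : List.take 8 (List.map PySem.Chars.lowerChar (c :: t)) = pvPat
      · have hQ : ¬ c = ';' := pat_head_ne_semi c t hP
        simp only [hP, hQ, if_true, if_false, ite_true, ite_false, eq_self_iff_true] at hEq ⊢
        rcases lt_trichotomy (PySem.Chars.rfind (PySem.Chars.lower t) pvPat)
            (PySem.Chars.rfind t [';']) with h | h | h
        · split_ifs at hEq ⊢ <;> first | omega | simp_all
        · have h1 := hes h
          split_ifs at hEq ⊢ <;> first | omega | simp_all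
        · split_ifs at hEq ⊢ <;> first | omega | simp_all
      · by_cases hQ : c = ';'
        · simp only [hP, hQ, if_true, if_false, ite_true, ite_false, eq_self_iff_true] at hEq ⊢
          rcases lt_trichotomy (PySem.Chars.rfind (PySem.Chars.lower t) pvPat)
              (PySem.Chars.rfind t [';']) with h | h | h
          · split_ifs at hEq ⊢ <;> first | omega | simp_all
          · have h1 := hes h
            split_ifs at hEq ⊢ <;> first | omega | simp_all
          · split_ifs at hEq ⊢ <;> first | omega | simp_all
        · simp only [hP, hQ, if_true, if_false, ite_true, ite_false, eq_self_iff_true] at hEq ⊢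
          rcases lt_trichotomy (PySem.Chars.rfind (PySem.Chars.lower t) pvPat)
              (PySem.Chars.rfind t [';']) with h | h | h
          · split_ifs at hEq ⊢ <;> first | omega | simp_all
          · have h1 := hes h
            split_ifs at hEq ⊢ <;> first | omega | simp_all
          · split_ifs at hEq ⊢ <;> first | omega | simp_all
    · intro f
      rw [tokEnd_cons, ihf]
      show nextFlag t _ = nextFlag (c :: t) f
      simp only [nextFlag]
      rw [hE', hS']
      by_cases hP : List.take 8 (List.map PySem.Chars.lowerChar (c :: t)) = pvPat
      · have hQ : ¬ c = ';' := pat_head_ne_semi c t hP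
        simp only [hP, hQ, if_true, if_false, ite_true, ite_false, eq_self_iff_true,
          false_and, and_true, and_false, true_and]
        rcases lt_trichotomy (PySem.Chars.rfind (PySem.Chars.lower t) pvPat)
            (PySem.Chars.rfind t [';']) with h | h | h
        · split_ifs <;> first | rfl | omega | (cases f <;> simp_all)
        · have h1 := hes h
          split_ifs <;> first | rfl | omega | (cases f <;> simp_all)
        · split_ifs <;> first | rfl | omega | (cases f <;> simp_all)
      · by_cases hQ : c = ';'
        · simp only [hP, hQ, if_true, if_false, ite_true, ite_false, eq_self_iff_true,
            false_and, and_true, and_false, true_and]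
          rcases lt_trichotomy (PySem.Chars.rfind (PySem.Chars.lower t) pvPat)
              (PySem.Chars.rfind t [';']) with h | h | h
          · split_ifs <;> first | rfl | omega | (cases f <;> simp_all)
          · have h1 := hes h
            split_ifs <;> first | rfl | omega | (cases f <;> simp_all)
          · split_ifs <;> first | rfl | omega | (cases f <;> simp_all)
        · simp only [hP, hQ, if_true, if_false, ite_true, ite_false, eq_self_iff_true,
            false_and, and_true, and_false, true_and]
          rcases lt_trichotomy (PySem.Chars.rfind (PySem.Chars.lower t) pvPat)
              (PySem.Chars.rfind t [';']) with h | h | h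
          · split_ifs <;> first | rfl | omega | (cases f <;> simp_all)
          · have h1 := hes h
            split_ifs <;> first | rfl | omega | (cases f <;> simp_all)
          · split_ifs <;> first | rfl | omega | (cases f <;> simp_all)

theorem take8_comma (l1 l2 : List Char) (h : l1.length < 8) :
    (List.map PySem.Chars.lowerChar (l1 ++ ',' :: l2)).take 8 ≠ pvPat := by
  intro hEq
  have hsplit : (List.map PySem.Chars.lowerChar (l1 ++ ',' :: l2)).take 8
      = (List.map PySem.Chars.lowerChar l1).take 8
        ++ (',' :: List.map PySem.Chars.lowerChar l2).take
            (8 - (List.map PySem.Chars.lowerChar l1).length) := by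
    rw [List.map_append, List.map_cons, List.take_append]
    rfl
  obtain ⟨k, hk⟩ : ∃ k, 8 - (List.map PySem.Chars.lowerChar l1).length = k + 1 :=
    ⟨7 - (List.map PySem.Chars.lowerChar l1).length, by simp; omega⟩
  have hm : (',' : Char) ∈ pvPat := by
    rw [← hEq, hsplit, hk, List.take_succ_cons]
    exact List.mem_append_right _ List.mem_cons_self
  exact absurd hm (by decide)

theorem take8_token (t rest : List Char) (hr : rest = [] ∨ ∃ r', rest = ',' :: r') :
    ((List.map PySem.Chars.lowerChar (t ++ rest)).take 8 = pvPat)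
      ↔ ((List.map PySem.Chars.lowerChar t).take 8 = pvPat) := by
  rcases hr with hr | ⟨r', hr⟩
  · rw [hr, List.append_nil]
  · subst hr
    by_cases hlen : 8 ≤ t.length
    · rw [List.map_append, List.take_append_of_le_length (by simpa using hlen)]
    · push_neg at hlen
      constructor
      · intro h
        exact absurd h (take8_comma t r' hlen)
      · intro h
        exfalso
        have hml : (List.map PySem.Chars.lowerChar t).length < 8 := by simpa using hlen
        rw [List.take_of_length_le (by omega)] at h
        have := congrArg List.length h
        rw [show pvPat.length = 8 from rfl] at this
        omega

theorem aLoop_cons (ch : Char) (rt ls : List Char) (parts : List String) (chunk : List Char)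
    (flag : Bool) :
    aLoop (ch :: rt) ls parts chunk flag
      = if ch = ',' ∧ (if ls.take 8 = pvPat then true else flag) = false then
          aLoop rt ls.tail
            (if PySem.Chars.strip chunk ≠ [] then parts ++ [String.ofList (PySem.Chars.strip chunk)]
             else parts) [] (if ls.take 8 = pvPat then true else flag)
        else
          aLoop rt ls.tail parts (chunk ++ [ch])
            (if ch = ';' ∧ (if ls.take 8 = pvPat then true else flag) = true then false
             else if ls.take 8 = pvPat then true else flag) := by
  simp only [aLoop]

theorem tokenStep (rest : List Char) (hr : rest = [] ∨ ∃ r', rest = ',' :: r') :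
    ∀ (t : List Char), (',' : Char) ∉ t → ∀ chunk flag parts,
    aLoop (t ++ rest) (List.map PySem.Chars.lowerChar (t ++ rest)) parts chunk flag
      = aLoop rest (List.map PySem.Chars.lowerChar rest) parts (chunk ++ t) (tokEnd t flag) := by
  intro t
  induction t with
  | nil =>
    intro _ chunk flag parts
    simp [tokEnd]
  | cons c t' ih =>
    intro ht chunk flag parts
    have hc : c ≠ ',' := fun hx => ht (hx ▸ List.mem_cons_self)
    have ht' : (',' : Char) ∉ t' := fun hx => ht (List.mem_cons_of_mem _ hx)
    rw [List.cons_append, aLoop_cons]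
    rw [if_neg (fun hx => hc hx.1)]
    rw [show (List.map PySem.Chars.lowerChar (c :: (t' ++ rest))).tail
          = List.map PySem.Chars.lowerChar (t' ++ rest) from rfl]
    rw [ih ht' (chunk ++ [c]) _ parts]
    rw [show (chunk ++ [c]) ++ t' = chunk ++ (c :: t') by simp]
    have hiff : ((List.map PySem.Chars.lowerChar (c :: (t' ++ rest))).take 8 = pvPat)
        ↔ ((List.map PySem.Chars.lowerChar (c :: t')).take 8 = pvPat) := by
      have h := take8_token (c :: t') rest hr
      rwa [List.cons_append] at h
    have hf : (if c = ';' ∧ (if (List.map PySem.Chars.lowerChar (c :: (t' ++ rest))).take 8 = pvPat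
            then true else flag) = true then false
          else if (List.map PySem.Chars.lowerChar (c :: (t' ++ rest))).take 8 = pvPat then true
            else flag)
        = (if c = ';' ∧ (if (List.map PySem.Chars.lowerChar (c :: t')).take 8 = pvPat then true
            else flag) = true then false
          else if (List.map PySem.Chars.lowerChar (c :: t')).take 8 = pvPat then true else flag) := by
      by_cases hP : (List.map PySem.Chars.lowerChar (c :: t')).take 8 = pvPat
      · rw [if_pos hP, if_pos (hiff.mpr hP)]
      · rw [if_neg hP, if_neg (fun hx => hP (hiff.mp hx))]
    rw [hf, ← tokEnd_cons]

theorem joinC_shape (r : List (List Char)) :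
    joinC ([] :: r) = [] ∨ ∃ r'', joinC ([] :: r) = ',' :: r'' := by
  rcases r with _ | ⟨x, xs⟩
  · left; rfl
  · right; exact ⟨_, joinC_nil_cons _ (by simp)⟩

theorem bridge (toks : List (List Char)) (h : ∀ t ∈ toks, (',' : Char) ∉ t) :
    ∀ flag buf parts,
    aLoop (joinC ([] :: toks)) (List.map PySem.Chars.lowerChar (joinC ([] :: toks))) parts buf flag
      = bLoop toks flag buf parts := by
  induction toks with
  | nil =>
    intro flag buf parts
    simp [joinC, aLoop, bLoop]
  | cons t r ih =>
    intro flag buf parts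
    have htc : (',' : Char) ∉ t := h t List.mem_cons_self
    have hr' : ∀ u ∈ r, (',' : Char) ∉ u := fun u hu => h u (List.mem_cons_of_mem _ hu)
    rw [joinC_nil_cons _ (by simp), joinC_cons_eq t r]
    rw [aLoop_cons]
    have hnotpat :
        ¬ (List.map PySem.Chars.lowerChar (',' :: (t ++ joinC ([] :: r)))).take 8 = pvPat := by
      have h0 := take8_comma [] (t ++ joinC ([] :: r)) (by simp)
      simpa using h0
    simp only [if_neg hnotpat]
    rw [show (List.map PySem.Chars.lowerChar (',' :: (t ++ joinC ([] :: r)))).tail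
          = List.map PySem.Chars.lowerChar (t ++ joinC ([] :: r)) from rfl]
    cases flag with
    | false =>
      rw [if_pos (show True ∧ (false : Bool) = false from ⟨trivial, rfl⟩)]
      rw [tokenStep _ (joinC_shape r) t htc [] false _]
      rw [show ([] : List Char) ++ t = t from rfl]
      rw [(tokEnd_eq_nextFlag t).2.2.2]
      rw [ih hr']
      simp [bLoop]
    | true =>
      rw [if_neg (show ¬ (True ∧ (true : Bool) = false) by simp)]
      rw [show (if (',' : Char) = ';' ∧ (true : Bool) = true then false else true) = true by
            decide]
      rw [tokenStep _ (joinC_shape r) t htc (buf ++ [',']) true parts]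
      rw [show (buf ++ [',']) ++ t = buf ++ ',' :: t by simp]
      rw [(tokEnd_eq_nextFlag t).2.2.2]
      rw [ih hr']
      simp [bLoop]

-- ===== VERDICT (by name: the statement is the Claim_ definition above) =====
theorem split_set_cookie_header_spec : Claim_equal_split_set_cookie_header := by
  intro raw _
  show split_set_cookie_header raw = split_set_cookie_header_alt raw
  by_cases hraw : raw = ""
  · subst hraw
    have hA : split_set_cookie_header "" = [] := by simp [split_set_cookie_header]
    have hB : split_set_cookie_header_alt "" = [] := by decide
    rw [hA, hB]
  · unfold split_set_cookie_header split_set_cookie_header_alt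
    rw [if_neg hraw, splitOn_comma]
    rcases hsc : splitComma raw.toList with _ | ⟨t0, rest⟩
    · exact absurd hsc (splitComma_ne_nil _)
    · have hnc := splitComma_no_comma raw.toList
      rw [hsc] at hnc
      have ht0 : (',' : Char) ∉ t0 := hnc t0 List.mem_cons_self
      have hrest : ∀ u ∈ rest, (',' : Char) ∉ u := fun u hu => hnc u (List.mem_cons_of_mem _ hu)
      have hjoin : raw.toList = t0 ++ joinC ([] :: rest) := by
        conv_lhs => rw [← joinC_splitComma raw.toList, hsc, joinC_cons_eq]
      have hlow : (PySem.Str.lower raw).toList = List.map PySem.Chars.lowerChar raw.toList := by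
        simp [PySem.Chars.lower]
      rw [hlow, hjoin]
      rw [tokenStep _ (joinC_shape rest) t0 ht0 [] false []]
      rw [(tokEnd_eq_nextFlag t0).2.2.2]
      rw [show ([] : List Char) ++ t0 = t0 from rfl]
      exact bridge rest hrest (nextFlag t0 false) t0 []
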